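-- pv_equiv track=rewrite | github.com/Kelvinl14/seeding_system | product_generator.py | generate_variation_combinations
-- ===== SOURCE A (Python) =====
-- from itertools import product, islice
-- from typing import Dict, List, Iterator
--
-- def generate_variation_combinations(
--     variations: Dict[str, List[str]],
--     max_combinations: int
-- ) -> Iterator[Dict[str, str]]:
--     """
--     Gera combinações de variações de forma controlada (lazy),
--     evitando explosão combinatória.
--     """
--     if not variations:
--         return iter([{}])
--
--     keys = list(variations.keys())
--     values = [variations[k] for k in keys]
--
--     combinations = product(*values)
--     limited = islice(combinations, max_combinations)
--
--     for combo in limited: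
--         yield dict(zip(keys, combo))
-- ===== SOURCE B (Python) =====
-- def generate_variation_combinations(variations, max_combinations):
--     """Random-access unranking: the r-th combination is decoded directly from
--     its rank r by mixed-radix arithmetic over suffix-product weights, instead
--     of enumerating the Cartesian product sequentially."""
--     items = list(variations.items())
--     weights = []
--     w = 1
--     for _, vals in reversed(items):
--         weights.append(w)
--         w = w * len(vals)
--     weights.reverse()
--     total = w
--     count = max_combinations if max_combinations < total else total
--     for r in range(count):
--         yield {key: vals[(r // wt) % len(vals)]
--                for (key, vals), wt in zip(items, weights)}
-- ===== Notes on version B (the rewrite author's own statement) =====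
-- stated objective: alternative
-- what changed: Replaces itertools.product's sequential enumeration with random-access unranking: suffix-product weights are computed once and the r-th combination is decoded directly from its rank r by mixed-radix division/modulus, one independent computation per rank.
-- intended difference: On an empty variations dict with max_combinations >= 1, A yields nothing because its 'return iter([{}])' value is discarded by the generator protocol, while B yields the single empty combination {} - the value A's author evidently intended. — e.g. on generate_variation_combinations([], 1): A returns [], B returns [[]]
import Mathlib
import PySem

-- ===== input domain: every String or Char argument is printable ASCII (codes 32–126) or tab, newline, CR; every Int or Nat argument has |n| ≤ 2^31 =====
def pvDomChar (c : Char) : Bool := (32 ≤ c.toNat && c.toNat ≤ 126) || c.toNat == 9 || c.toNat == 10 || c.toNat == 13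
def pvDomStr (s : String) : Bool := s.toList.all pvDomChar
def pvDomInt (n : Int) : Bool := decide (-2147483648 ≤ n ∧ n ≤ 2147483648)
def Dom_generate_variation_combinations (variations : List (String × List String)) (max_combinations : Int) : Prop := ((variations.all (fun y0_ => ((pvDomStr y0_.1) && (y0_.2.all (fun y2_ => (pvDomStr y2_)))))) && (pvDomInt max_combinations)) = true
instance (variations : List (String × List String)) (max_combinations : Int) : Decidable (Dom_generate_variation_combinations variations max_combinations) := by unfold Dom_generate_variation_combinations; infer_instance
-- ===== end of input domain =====

-- B replaces itertools.product's sequential enumeration by random-access unranking: the r-th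
-- combination is decoded from its rank r via mixed-radix arithmetic over suffix-product weights
-- (objective: alternative algorithm, same cost). Equivalence is about the fully consumed sequence.

-- ===== PORT A =====
-- itertools.product(*values): leftmost list varies slowest
def pvProductA : List (List String) → List (List String)
  | [] => [[]]
  | vs :: rest => vs.flatMap (fun v => (pvProductA rest).map (fun c => v :: c))

def generate_variation_combinations (variations : List (String × List String)) (max_combinations : Int) : List (List (String × String)) :=
  if variations = [] then []  -- 'return iter([{}])' inside a generator: the value is discarded, nothing is yielded
  else
    let keys := variations.map Prod.fst
    let values := variations.map Prod.snd
    -- islice(combinations, max_combinations) then dict(zip(keys, combo)); Pre_ gives 0 ≤ max_combinations here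
    ((pvProductA values).take max_combinations.toNat).map (fun combo => keys.zip combo)

-- ===== PORT B =====
def generate_variation_combinations_alt (variations : List (String × List String)) (max_combinations : Int) : List (List (String × String)) :=
  -- 'for _, vals in reversed(items): weights.append(w); w = w * len(vals)'
  let acc := variations.reverse.foldl (fun (acc : List Nat × Nat) p => (acc.1 ++ [acc.2], acc.2 * p.2.length)) ([], 1)
  let weights := acc.1.reverse        -- 'weights.reverse()'
  let total : Int := (acc.2 : Int)
  -- 'count = max_combinations if max_combinations < total else total'
  let count : Int := if max_combinations < total then max_combinations else total
  -- 'for r in range(count): yield {key: vals[(r // wt) % len(vals)] for (key, vals), wt in zip(items, weights)}'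
  (List.range count.toNat).map (fun r =>
    List.zipWith (fun (p : String × List String) (wt : Nat) =>
      (p.1, p.2.getD ((r / wt) % p.2.length) "")) variations weights)

-- ===== PRECONDITION & SPEC =====
-- Pre_ excludes exactly the inputs where A raises: with non-empty variations and a negative
-- max_combinations, islice raises ValueError (with empty variations A returns before islice).
def Pre_generate_variation_combinations (variations : List (String × List String)) (max_combinations : Int) : Prop :=
  0 ≤ max_combinations ∨ variations = []
instance (variations : List (String × List String)) (max_combinations : Int) : Decidable (Pre_generate_variation_combinations variations max_combinations) := by unfold Pre_generate_variation_combinations; infer_instance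

def pvWitness_generate_variation_combinations : (List (String × List String)) × Int :=
  ([("a", ["x", "y"]), ("b", ["1"])], 3)

-- On empty variations with max_combinations ≥ 1, A yields nothing (its 'return iter([{}])' is
-- discarded by the generator protocol) while B yields the single empty combination, the value
-- A's author evidently intended.
def D_generate_variation_combinations (variations : List (String × List String)) (max_combinations : Int) : Prop :=
  variations = [] ∧ 1 ≤ max_combinations
instance (variations : List (String × List String)) (max_combinations : Int) : Decidable (D_generate_variation_combinations variations max_combinations) := by unfold D_generate_variation_combinations; infer_instance

def Spec_generate_variation_combinations (variations : List (String × List String)) (max_combinations : Int) (out : List (List (String × String))) : Prop := ¬ D_generate_variation_combinations variations max_combinations → out = generate_variation_combinations_alt variations max_combinations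
instance (variations : List (String × List String)) (max_combinations : Int) (out : List (List (String × String))) : Decidable (Spec_generate_variation_combinations variations max_combinations out) := by unfold Spec_generate_variation_combinations; infer_instance

def pvDiffWitness_generate_variation_combinations : (List (String × List String)) × Int := ([], 1)
def pvDiffWitnessOut_generate_variation_combinations : (List (List (String × String))) × (List (List (String × String))) := ([], [[]])

-- ===== CLAIM (what is proved, stated in full; the proofs are below) =====
def Claim_unchanged_generate_variation_combinations : Prop := ∀ (variations : List (String × List String)) (max_combinations : Int), Dom_generate_variation_combinations variations max_combinations → Pre_generate_variation_combinations variations max_combinations → Spec_generate_variation_combinations variations max_combinations (generate_variation_combinations variations max_combinations)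
def Claim_changed_generate_variation_combinations : Prop := Dom_generate_variation_combinations (pvDiffWitness_generate_variation_combinations.1) (pvDiffWitness_generate_variation_combinations.2) ∧ Pre_generate_variation_combinations (pvDiffWitness_generate_variation_combinations.1) (pvDiffWitness_generate_variation_combinations.2) ∧ D_generate_variation_combinations (pvDiffWitness_generate_variation_combinations.1) (pvDiffWitness_generate_variation_combinations.2) ∧ generate_variation_combinations (pvDiffWitness_generate_variation_combinations.1) (pvDiffWitness_generate_variation_combinations.2) = pvDiffWitnessOut_generate_variation_combinations.1 ∧ generate_variation_combinations_alt (pvDiffWitness_generate_variation_combinations.1) (pvDiffWitness_generate_variation_combinations.2) = pvDiffWitnessOut_generate_variation_combinations.2 ∧ pvDiffWitnessOut_generate_variation_combinations.1 ≠ pvDiffWitnessOut_generate_variation_combinations.2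
def Claim_exact_generate_variation_combinations : Prop := ∀ (variations : List (String × List String)) (max_combinations : Int), Dom_generate_variation_combinations variations max_combinations → Pre_generate_variation_combinations variations max_combinations → D_generate_variation_combinations variations max_combinations → generate_variation_combinations variations max_combinations ≠ generate_variation_combinations_alt variations max_combinations

-- ===== LEMMAS AND PROOFS =====

-- Specification middleman: the product assignment list, built by structural recursion.
def pvRecB : List (String × List String) → List (List (String × String))
  | [] => [[]]
  | (key, vals) :: rest => vals.flatMap (fun v => (pvRecB rest).map (fun tail => (key, v) :: tail))

-- number of combinations
def pvCount (items : List (String × List String)) : Nat :=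
  items.foldr (fun p acc => p.2.length * acc) 1

-- suffix-product weights
def pvW : List (String × List String) → List Nat
  | [] => []
  | _ :: rest => pvCount rest :: pvW rest

-- the combination of rank r
def pvU (vs : List (String × List String)) (r : Nat) : List (String × String) :=
  List.zipWith (fun (p : String × List String) (wt : Nat) =>
    (p.1, p.2.getD ((r / wt) % p.2.length) "")) vs (pvW vs)

theorem pvRecB_eq (vs : List (String × List String)) :
    pvRecB vs = (pvProductA (vs.map Prod.snd)).map (fun c => (vs.map Prod.fst).zip c) := by
  induction vs with
  | nil => rfl
  | cons p rest ih =>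
    obtain ⟨k, vals⟩ := p
    simp [pvRecB, pvProductA, ih, List.map_flatMap, List.map_map, Function.comp_def, List.zip, List.zipWith]

theorem pvFlatMap_getD {α : Type} (vs : List String) (F : String → List α) :
    vs.flatMap F = (List.range vs.length).flatMap (fun i => F (vs.getD i "")) := by
  induction vs with
  | nil => rfl
  | cons v vs ih =>
    simp only [List.length_cons, List.range_succ_eq_map, List.flatMap_cons, List.flatMap_map,
      List.getD_cons_zero, List.getD_cons_succ]
    rw [ih]

-- the weights loop of B computes pvW (reversed) and pvCount
theorem pvFoldW (vs : List (String × List String)) :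
    vs.reverse.foldl (fun (acc : List Nat × Nat) p => (acc.1 ++ [acc.2], acc.2 * p.2.length)) ([], 1)
      = ((pvW vs).reverse, pvCount vs) := by
  induction vs with
  | nil => rfl
  | cons p rest ih =>
    simp only [List.reverse_cons, List.foldl_append, ih, List.foldl_cons, List.foldl_nil]
    simp [pvW, pvCount, Nat.mul_comm]

-- decoding is invariant under adding multiples of the total count
theorem pvU_add (vs : List (String × List String)) :
    ∀ (c r : Nat), pvU vs (c * pvCount vs + r) = pvU vs r := by
  induction vs with
  | nil => intro c r; rfl
  | cons p rest ih =>
    intro c r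
    by_cases hW : pvCount rest = 0
    · have h0 : pvCount (p :: rest) = 0 := by
        rw [show pvCount (p :: rest) = p.2.length * pvCount rest from rfl, hW, Nat.mul_zero]
      rw [h0, Nat.mul_zero, Nat.zero_add]
    · have hWpos : 0 < pvCount rest := Nat.pos_of_ne_zero hW
      have harg : c * pvCount (p :: rest) + r = (c * p.2.length) * pvCount rest + r := by
        rw [show pvCount (p :: rest) = p.2.length * pvCount rest from rfl]; ring
      show List.zipWith _ (p :: rest) (pvCount rest :: pvW rest)
          = List.zipWith _ (p :: rest) (pvCount rest :: pvW rest)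
      simp only [List.zipWith_cons_cons, List.cons.injEq, Prod.mk.injEq]
      refine ⟨⟨trivial, ?_⟩, ?_⟩
      · rw [harg, Nat.mul_comm (c * p.2.length) (pvCount rest), Nat.mul_add_div hWpos,
          Nat.add_comm, Nat.add_mul_mod_self_right]
      · rw [harg]; exact ih (c * p.2.length) r

-- mixed-radix decomposition of a range
theorem pvRangeMul {α : Type} (a b : Nat) (g : Nat → α) :
    (List.range (a * b)).map g
      = (List.range a).flatMap (fun i => (List.range b).map (fun j => g (i * b + j))) := by
  induction a with
  | zero => simp
  | succ a ih =>
    have : (a + 1) * b = a * b + b := by ring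
    rw [this, List.range_add, List.map_append, ih, List.range_succ, List.flatMap_append]
    simp [List.map_map, Function.comp_def]

-- the product list is exactly the ranks 0..count-1 decoded
theorem pvRecB_unrank (vs : List (String × List String)) :
    pvRecB vs = (List.range (pvCount vs)).map (pvU vs) := by
  induction vs with
  | nil => rfl
  | cons p rest ih =>
    obtain ⟨k, vals⟩ := p
    have hcount : pvCount ((k, vals) :: rest) = vals.length * pvCount rest := rfl
    rw [pvRecB, pvFlatMap_getD vals (fun v => (pvRecB rest).map (fun tail => (k, v) :: tail)),
      hcount, pvRangeMul]
    apply List.flatMap_congr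
    intro i hi
    have hilt : i < vals.length := List.mem_range.mp hi
    rw [ih, List.map_map]
    apply List.map_congr_left
    intro j hj
    have hjlt : j < pvCount rest := List.mem_range.mp hj
    have hWpos : 0 < pvCount rest := Nat.lt_of_le_of_lt (Nat.zero_le j) hjlt
    have htail : pvU rest (i * pvCount rest + j) = pvU rest j := pvU_add rest i j
    have hhead : (i * pvCount rest + j) / pvCount rest % vals.length = i := by
      rw [Nat.mul_comm, Nat.mul_add_div hWpos, Nat.div_eq_of_lt hjlt, Nat.add_zero,
        Nat.mod_eq_of_lt hilt]
    show (k, vals.getD i "") :: pvU rest j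
        = (k, vals.getD ((i * pvCount rest + j) / pvCount rest % vals.length) "")
          :: pvU rest (i * pvCount rest + j)
    rw [hhead, htail]

-- ===== VERDICT (by name: the statement is the Claim_ definition above) =====
theorem generate_variation_combinations_spec : Claim_unchanged_generate_variation_combinations := by
  intro vs m _hd hpre hnd
  show _ = _
  by_cases h : vs = []
  · subst h
    have hm : m ≤ 0 := by
      unfold D_generate_variation_combinations at hnd
      simp only [true_and, not_le] at hnd
      omega
    have hmlt : m < ((1 : Nat) : Int) := by omega
    simp only [generate_variation_combinations, generate_variation_combinations_alt,
      List.reverse_nil, List.foldl_nil, if_pos hmlt]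
    rw [show m.toNat = 0 by omega]
    rfl
  · have hm : 0 ≤ m := by
      rcases hpre with hm | hc
      · exact hm
      · exact absurd hc h
    unfold generate_variation_combinations generate_variation_combinations_alt
    rw [if_neg h]
    simp only [pvFoldW, List.reverse_reverse]
    rw [List.map_take, ← pvRecB_eq, pvRecB_unrank vs, ← List.map_take, List.take_range]
    show (List.range (min m.toNat (pvCount vs))).map (pvU vs)
        = (List.range (if m < ((pvCount vs : Nat) : Int) then m else ((pvCount vs : Nat) : Int)).toNat).map _
    have : min m.toNat (pvCount vs)
        = (if m < ((pvCount vs : Nat) : Int) then m else ((pvCount vs : Nat) : Int)).toNat := by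
      split_ifs with hlt <;> omega
    rw [← this]
    rfl

theorem generate_variation_combinations_changed : Claim_changed_generate_variation_combinations := by
  unfold Claim_changed_generate_variation_combinations; decide

theorem generate_variation_combinations_tight : Claim_exact_generate_variation_combinations := by
  intro vs m _hd _hpre hd
  obtain ⟨hnil, hm⟩ := hd
  subst hnil
  have hnlt : ¬ m < ((1 : Nat) : Int) := by omega
  simp only [generate_variation_combinations, generate_variation_combinations_alt,
    List.reverse_nil, List.foldl_nil, if_neg hnlt]
  intro hc
  simp at hc
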